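-- pv_equiv track=rewrite | github.com/DeStep3000/SkillGap | app/services/llm_service.py | _replace_json_literal_token
-- ===== SOURCE A (Python) =====
-- def _replace_json_literal_token(content: str, index: int) -> tuple[str, int] | None:
--     token_map = {
--         "true": "True",
--         "false": "False",
--         "null": "None",
--     }
--     for token, replacement in token_map.items():
--         if not content.startswith(token, index):
--             continue
--
--         left_ok = index == 0 or not (
--             content[index - 1].isalnum() or content[index - 1] == "_"
--         )
--         right_index = index + len(token)
--         right_ok = right_index >= len(content) or not (
--             content[right_index].isalnum() or content[right_index] == "_"
--         )
--         if left_ok and right_ok: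
--             return replacement, len(token)
--
--     return None
-- ===== SOURCE B (Python) =====
-- def _replace_json_literal_token(content: str, index: int) -> tuple[str, int] | None:
--     n = len(content)
--     if index < 0 or index >= n:
--         return None
--     j = index
--     while j < n and (content[j].isalnum() or content[j] == "_"):
--         j += 1
--     word = content[index:j]
--     replacement = {"true": "True", "false": "False", "null": "None"}.get(word)
--     if replacement is None:
--         return None
--     if index > 0 and (content[index - 1].isalnum() or content[index - 1] == "_"):
--         return None
--     return replacement, len(word)
-- ===== Notes on version B (the rewrite author's own statement) =====
-- stated objective: simpler
-- what changed: Instead of trying each of the three JSON tokens with startswith plus a separate right-boundary test, B extracts the maximal identifier run starting at index in one scan and looks that word up in the token dict (the run's maximality makes the right-boundary test unnecessary), checking only the left boundary.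
-- outside the precondition, e.g. on _replace_json_literal_token('?true', -4): A returns ('True', 4), B returns None; on _replace_json_literal_token('true', -4): A raises IndexError, B returns None; on _replace_json_literal_token('Xtrue', -4): A returns None, B returns None
import Mathlib
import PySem

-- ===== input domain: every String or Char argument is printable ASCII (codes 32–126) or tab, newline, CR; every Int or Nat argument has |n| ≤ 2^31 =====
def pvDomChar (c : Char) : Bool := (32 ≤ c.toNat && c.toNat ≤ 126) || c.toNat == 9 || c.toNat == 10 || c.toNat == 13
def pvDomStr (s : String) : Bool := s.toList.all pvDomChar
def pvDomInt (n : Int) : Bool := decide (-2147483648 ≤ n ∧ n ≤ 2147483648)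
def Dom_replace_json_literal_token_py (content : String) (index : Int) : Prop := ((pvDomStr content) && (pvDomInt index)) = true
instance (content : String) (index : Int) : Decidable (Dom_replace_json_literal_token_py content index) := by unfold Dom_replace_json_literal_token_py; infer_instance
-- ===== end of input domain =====

-- B replaces A's per-token startswith + right-boundary tests by one maximal-identifier-run
-- scan followed by a direct dict lookup of the word (objective: simpler).


-- ===== PORT A =====
-- c.isalnum() or c == "_"
def pvIsWordChar (c : Char) : Bool := PySem.Chars.isalnum c || c == '_'

-- content[i].isalnum() or content[i] == "_" with Python indexing; the `none` case of
-- pyGet? is Python's IndexError, excluded by Pre_ (never reached there).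
def pvWordAt (cs : List Char) (i : Int) : Bool :=
  match PySem.List.pyGet? cs i with
  | some c => pvIsWordChar c
  | none => false



-- content.startswith(token, index): Python clamps a negative start like a slice, then
-- requires the token to fit before the end of the string and match; exact for ASCII.
def pvStartswithFrom (cs tok : List Char) (index : Int) : Bool :=
  let n : Int := cs.length
  let st : Int := if index < 0 then max 0 (n + index) else index
  decide (st + (tok.length : Int) ≤ n) && decide ((cs.drop st.toNat).take tok.length = tok)

-- the for-loop over token_map.items() with its continue / return structure
def pvTryTokensA (cs : List Char) (index : Int) : List (List Char × String) → Option (String × Int)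
  | [] => none
  | (tok, rep) :: rest =>
    if pvStartswithFrom cs tok index then
      let left_ok := (index == 0) || !(pvWordAt cs (index - 1))
      let right_index := index + (tok.length : Int)
      let right_ok := decide ((cs.length : Int) ≤ right_index) || !(pvWordAt cs right_index)
      if left_ok && right_ok then some (rep, (tok.length : Int))
      else pvTryTokensA cs index rest
    else pvTryTokensA cs index rest

def replace_json_literal_token_py (content : String) (index : Int) : Option (String × Int) :=
  pvTryTokensA content.toList index
    [("true".toList, "True"), ("false".toList, "False"), ("null".toList, "None")]

-- ===== PORT B =====
-- while j < n and (content[j].isalnum() or content[j] == "_"): j += 1  — run length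
def pvRunLen : List Char → Nat
  | [] => 0
  | c :: rest => if pvIsWordChar c then pvRunLen rest + 1 else 0

-- content[j].isalnum() or content[j] == "_" for a Nat position (guarded in Source B)
def pvWordAtNat (cs : List Char) (j : Nat) : Bool :=
  match cs[j]? with
  | some c => pvIsWordChar c
  | none => false

def replace_json_literal_token_py_alt (content : String) (index : Int) : Option (String × Int) :=
  let cs := content.toList
  if index < 0 || decide ((cs.length : Int) ≤ index) then none
  else
    let i := index.toNat
    let len := pvRunLen (cs.drop i)
    let word := (cs.drop i).take len
    let repl : Option String :=
      if word = "true".toList then some "True"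
      else if word = "false".toList then some "False"
      else if word = "null".toList then some "None"
      else none
    match repl with
    | none => none
    | some r =>
      if decide (0 < index) && pvWordAtNat cs (i - 1) then none
      else some (r, (len : Int))

-- ===== PRECONDITION & SPEC =====
-- Pre_ excludes negative indices: there A's str.startswith counts from the end while its
-- boundary checks use the raw index (an accident of the implementation, raising IndexError
-- when index ≤ -len(content) and the token matches at the clamped start).
def Pre_replace_json_literal_token_py (content : String) (index : Int) : Prop := 0 ≤ index
instance (content : String) (index : Int) : Decidable (Pre_replace_json_literal_token_py content index) := by unfold Pre_replace_json_literal_token_py; infer_instance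

def pvWitness_replace_json_literal_token_py : String × Int := ("a true,b", 2)

def Spec_replace_json_literal_token_py (content : String) (index : Int) (out : Option (String × Int)) : Prop := out = replace_json_literal_token_py_alt content index
instance (content : String) (index : Int) (out : Option (String × Int)) : Decidable (Spec_replace_json_literal_token_py content index out) := by unfold Spec_replace_json_literal_token_py; infer_instance

-- ===== CLAIM (what is proved, stated in full; the proofs are below) =====
def Claim_equal_replace_json_literal_token_py : Prop := ∀ (content : String) (index : Int), Dom_replace_json_literal_token_py content index → Pre_replace_json_literal_token_py content index → Spec_replace_json_literal_token_py content index (replace_json_literal_token_py content index)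

-- ===== LEMMAS AND PROOFS =====

theorem pvRunLen_le_length (rest : List Char) : pvRunLen rest ≤ rest.length := by
  induction rest with
  | nil => simp [pvRunLen]
  | cons c t ih => simp only [pvRunLen]; split <;> simp <;> omega

theorem pvRunLen_all (rest : List Char) : ∀ c ∈ rest.take (pvRunLen rest), pvIsWordChar c = true := by
  induction rest with
  | nil => simp
  | cons c t ih =>
    simp only [pvRunLen]
    by_cases h : pvIsWordChar c
    · rw [if_pos h]
      intro d hd
      rw [List.take_succ_cons] at hd
      rcases List.mem_cons.1 hd with rfl | hm
      · exact h
      · exact ih d hm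
    · rw [if_neg h]; simp

theorem pvRunLen_stop (rest : List Char) (c : Char) (h : rest[pvRunLen rest]? = some c) :
    pvIsWordChar c = false := by
  induction rest generalizing c with
  | nil => simp at h
  | cons d t ih =>
    simp only [pvRunLen] at h ⊢
    by_cases hw : pvIsWordChar d
    · rw [if_pos hw] at h; simp at h; exact ih c h
    · rw [if_neg hw] at h; simp at h; subst h; simpa using hw

theorem pvRunLen_ge (tok rest : List Char) (h : tok <+: rest)
    (hw : ∀ c ∈ tok, pvIsWordChar c = true) : tok.length ≤ pvRunLen rest := by
  induction tok generalizing rest with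
  | nil => simp
  | cons c t ih =>
    obtain ⟨s, rfl⟩ := h
    simp only [pvRunLen, List.cons_append]
    rw [if_pos (hw c (by simp))]
    have h2 := ih (t ++ s) ⟨s, rfl⟩ (fun d hd => hw d (by simp [hd]))
    simp only [List.length_cons]
    omega

theorem take_runLen_eq_iff (tok rest : List Char) (hne : tok ≠ [])
    (hw : ∀ c ∈ tok, pvIsWordChar c = true) :
    rest.take (pvRunLen rest) = tok ↔
      (tok <+: rest ∧ ∀ c, rest[tok.length]? = some c → pvIsWordChar c = false) := by
  constructor
  · intro h
    have hL : pvRunLen rest ≤ rest.length := pvRunLen_le_length rest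
    have hlen : tok.length = pvRunLen rest := by
      have := congrArg List.length h; simp [Nat.min_eq_left hL] at this; omega
    refine ⟨h ▸ List.take_prefix _ _, ?_⟩
    intro c hc; exact pvRunLen_stop rest c (by rwa [hlen] at hc)
  · rintro ⟨hpre, hstop⟩
    have hge := pvRunLen_ge tok rest hpre hw
    have hle : pvRunLen rest ≤ tok.length := by
      by_contra hlt
      push_neg at hlt
      have hlen2 : tok.length < rest.length := lt_of_lt_of_le hlt (pvRunLen_le_length rest)
      have : pvIsWordChar rest[tok.length] = true := by
        apply pvRunLen_all rest rest[tok.length]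
        rw [List.mem_take_iff_getElem]
        exact ⟨tok.length, by omega, by simp⟩
      have := hstop rest[tok.length] (by simp [hlen2])
      simp_all
    have : pvRunLen rest = tok.length := le_antisymm hle hge
    rw [this]
    exact (List.prefix_iff_eq_take.1 hpre).symm

theorem pvStartswithFrom_nonneg (cs tok : List Char) (i : Nat) (hne : tok ≠ []) :
    pvStartswithFrom cs tok (i : Int) = true ↔ tok <+: cs.drop i := by
  simp only [pvStartswithFrom]
  rw [if_neg (by omega : ¬ ((i : Int) < 0))]
  simp only [Int.toNat_natCast, Bool.and_eq_true, decide_eq_true_eq]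
  constructor
  · rintro ⟨_, htake⟩; exact htake ▸ List.take_prefix _ _
  · intro hpre
    refine ⟨?_, (List.prefix_iff_eq_take.1 hpre).symm⟩
    have hlen := hpre.length_le
    simp only [List.length_drop] at hlen
    have hp : 0 < tok.length := List.length_pos_of_ne_nil hne
    omega

theorem pvRightOk (cs : List Char) (i tlen : Nat) :
    (decide ((cs.length : Int) ≤ (i : Int) + (tlen : Int)) || !(pvWordAt cs ((i : Int) + (tlen : Int)))) = true
      ↔ ∀ c, (cs.drop i)[tlen]? = some c → pvIsWordChar c = false := by
  have hcast : (i : Int) + (tlen : Int) = ((i + tlen : Nat) : Int) := by push_cast; ring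
  rw [hcast]
  simp only [pvWordAt, PySem.List.pyGet?_natCast, List.getElem?_drop]
  cases h : cs[i + tlen]? with
  | none =>
    have hle : cs.length ≤ i + tlen := by
      by_contra hc
      rw [List.getElem?_eq_getElem (by omega)] at h
      simp at h
    simp only [h]
    constructor
    · intro _ c hc; exact absurd hc (by simp)
    · intro _
      apply Bool.or_eq_true_iff.2; left
      exact decide_eq_true (by exact_mod_cast Int.ofNat_le.2 hle)
  | some c =>
    simp only [h]
    have hlt : i + tlen < cs.length := (List.getElem?_eq_some_iff.1 h).1
    have hnle : ¬ ((cs.length : Int) ≤ ((i + tlen : Nat) : Int)) := by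
      push_cast; omega
    rw [decide_eq_false hnle]
    simp only [Bool.false_or, Bool.not_eq_true']
    constructor
    · intro hnw d hd
      obtain rfl := Option.some.inj hd
      exact hnw
    · intro hstop; exact hstop c rfl

theorem pvLeftEq (cs : List Char) (i : Nat) :
    (((i : Int) == 0) || !(pvWordAt cs ((i : Int) - 1)))
      = !(decide (0 < (i : Int)) && (match cs[i - 1]? with | some c => pvIsWordChar c | none => false)) := by
  cases i with
  | zero => simp
  | succ j =>
    have h1 : ((j + 1 : Nat) : Int) - 1 = (j : Int) := by push_cast; ring
    have h2 : (((j + 1 : Nat) : Int) == 0) = false := beq_eq_false_iff_ne.mpr (by omega)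
    have h3 : decide (0 < ((j + 1 : Nat) : Int)) = true := decide_eq_true (by omega)
    simp only [h1, h2, h3, pvWordAt, PySem.List.pyGet?_natCast, Bool.false_or, Bool.true_and,
      Nat.add_sub_cancel]

theorem pvLeftEq' (cs : List Char) (i : Nat) :
    (((i : Int) == 0) || !(pvWordAt cs ((i : Int) - 1)))
      = !(decide (0 < (i : Int)) && pvWordAtNat cs (i - 1)) := by
  rw [pvLeftEq]; rfl

theorem pvMatchCase (cs : List Char) (i : Nat) (tok : List Char) (rep : String)
    (rest' : List (List Char × String)) (hne : tok ≠ [])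
    (hw : ∀ c ∈ tok, pvIsWordChar c = true)
    (hword : (cs.drop i).take (pvRunLen (cs.drop i)) = tok) :
    pvTryTokensA cs (i : Int) ((tok, rep) :: rest') =
      if decide (0 < (i : Int)) && pvWordAtNat cs (i - 1)
      then pvTryTokensA cs (i : Int) rest'
      else some (rep, (tok.length : Int)) := by
  obtain ⟨hpre, hstop⟩ := (take_runLen_eq_iff tok (cs.drop i) hne hw).1 hword
  have hsw := (pvStartswithFrom_nonneg cs tok i hne).2 hpre
  have hro := (pvRightOk cs i tok.length).2 hstop
  simp only [pvTryTokensA, hsw, if_true, hro, Bool.and_true, pvLeftEq']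
  cases hb : (decide (0 < (i : Int)) && pvWordAtNat cs (i - 1)) <;> simp [hb]

theorem pvSkipCase (cs : List Char) (i : Nat) (tok : List Char) (rep : String)
    (rest' : List (List Char × String)) (hne : tok ≠ [])
    (hw : ∀ c ∈ tok, pvIsWordChar c = true)
    (hword : (cs.drop i).take (pvRunLen (cs.drop i)) ≠ tok) :
    pvTryTokensA cs (i : Int) ((tok, rep) :: rest') = pvTryTokensA cs (i : Int) rest' := by
  by_cases hsw : pvStartswithFrom cs tok (i : Int) = true
  · have hpre := (pvStartswithFrom_nonneg cs tok i hne).1 hsw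
    have hro : (decide ((cs.length : Int) ≤ (i : Int) + (tok.length : Int))
        || !(pvWordAt cs ((i : Int) + (tok.length : Int)))) = false := by
      cases hb : (decide ((cs.length : Int) ≤ (i : Int) + (tok.length : Int))
          || !(pvWordAt cs ((i : Int) + (tok.length : Int))))
      · rfl
      · exact absurd ((take_runLen_eq_iff tok (cs.drop i) hne hw).2
          ⟨hpre, (pvRightOk cs i tok.length).1 hb⟩) hword
    simp only [pvTryTokensA, hsw, if_true, hro, Bool.and_false, Bool.false_eq_true, if_false]
  · have hsw' : pvStartswithFrom cs tok (i : Int) = false := by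
      cases h : pvStartswithFrom cs tok (i : Int)
      · rfl
      · exact absurd h hsw
    simp only [pvTryTokensA, hsw', Bool.false_eq_true, if_false]

theorem pvTL : "true".toList = ['t','r','u','e'] := rfl
theorem pvFL : "false".toList = ['f','a','l','s','e'] := rfl
theorem pvNL : "null".toList = ['n','u','l','l'] := rfl
theorem pvW_true : ∀ c ∈ "true".toList, pvIsWordChar c = true := by
  rw [pvTL]; intro c hc
  simp only [List.mem_cons, List.not_mem_nil, or_false] at hc
  rcases hc with rfl | rfl | rfl | rfl <;> decide
theorem pvW_false : ∀ c ∈ "false".toList, pvIsWordChar c = true := by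
  rw [pvFL]; intro c hc
  simp only [List.mem_cons, List.not_mem_nil, or_false] at hc
  rcases hc with rfl | rfl | rfl | rfl | rfl <;> decide
theorem pvW_null : ∀ c ∈ "null".toList, pvIsWordChar c = true := by
  rw [pvNL]; intro c hc
  simp only [List.mem_cons, List.not_mem_nil, or_false] at hc
  rcases hc with rfl | rfl | rfl | rfl <;> decide
theorem pvNe_true : "true".toList ≠ [] := by rw [pvTL]; decide
theorem pvNe_false : "false".toList ≠ [] := by rw [pvFL]; decide
theorem pvNe_null : "null".toList ≠ [] := by rw [pvNL]; decide

theorem pvMain (content : String) (i : Nat) :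
    pvTryTokensA content.toList (i : Int)
        [("true".toList, "True"), ("false".toList, "False"), ("null".toList, "None")]
      = replace_json_literal_token_py_alt content (i : Int) := by
  set cs := content.toList with hcs
  by_cases h1 : (cs.drop i).take (pvRunLen (cs.drop i)) = "true".toList
  · have hlt : i < cs.length := by
      rcases Nat.lt_or_ge i cs.length with h | h
      · exact h
      · exfalso
        rw [List.drop_eq_nil_of_le h] at h1
        simp at h1
    have hguard : (((i : Int) < 0 : Bool) || decide ((cs.length : Int) ≤ (i : Int))) = false := by
      have hA : ¬ ((cs.length : Int) ≤ (i : Int)) := by exact_mod_cast Nat.not_le.2 hlt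
      have hB : ¬ ((i : Int) < 0) := by omega
      simp [hA, hB]
    have hL : pvRunLen (cs.drop i) = 4 := by
      have h := congrArg List.length h1
      have hle : pvRunLen (cs.drop i) ≤ (cs.drop i).length := pvRunLen_le_length (cs.drop i)
      rw [List.length_take, Nat.min_eq_left hle, pvTL] at h
      simpa using h
    rw [pvMatchCase cs i "true".toList "True" _ pvNe_true pvW_true h1]
    simp only [replace_json_literal_token_py_alt, ← hcs, hguard, Bool.false_eq_true, if_false,
      Int.toNat_natCast, h1, if_pos rfl]
    split_ifs with hb
    · rw [pvSkipCase cs i "false".toList "False" _ pvNe_false pvW_false (by rw [h1, pvTL, pvFL]; decide),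
        pvSkipCase cs i "null".toList "None" _ pvNe_null pvW_null (by rw [h1, pvTL, pvNL]; decide)]
      rfl
    · rw [hL]; rfl
  · by_cases h2 : (cs.drop i).take (pvRunLen (cs.drop i)) = "false".toList
    · have hlt : i < cs.length := by
        rcases Nat.lt_or_ge i cs.length with h | h
        · exact h
        · exfalso
          rw [List.drop_eq_nil_of_le h] at h2
          simp at h2
      have hguard : (((i : Int) < 0 : Bool) || decide ((cs.length : Int) ≤ (i : Int))) = false := by
        have hA : ¬ ((cs.length : Int) ≤ (i : Int)) := by exact_mod_cast Nat.not_le.2 hlt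
        have hB : ¬ ((i : Int) < 0) := by omega
        simp [hA, hB]
      have hL : pvRunLen (cs.drop i) = 5 := by
        have h := congrArg List.length h2
        have hle : pvRunLen (cs.drop i) ≤ (cs.drop i).length := pvRunLen_le_length (cs.drop i)
        rw [List.length_take, Nat.min_eq_left hle, pvFL] at h
        simpa using h
      rw [pvSkipCase cs i "true".toList "True" _ pvNe_true pvW_true h1,
        pvMatchCase cs i "false".toList "False" _ pvNe_false pvW_false h2]
      simp only [replace_json_literal_token_py_alt, ← hcs, hguard, Bool.false_eq_true, if_false,
        Int.toNat_natCast]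
      rw [if_neg h1, if_pos h2]
      split_ifs with hb
      · rw [pvSkipCase cs i "null".toList "None" _ pvNe_null pvW_null
          (by rw [h2, pvFL, pvNL]; decide)]
        rfl
      · rw [hL]; rfl
    · by_cases h3 : (cs.drop i).take (pvRunLen (cs.drop i)) = "null".toList
      · have hlt : i < cs.length := by
          rcases Nat.lt_or_ge i cs.length with h | h
          · exact h
          · exfalso
            rw [List.drop_eq_nil_of_le h] at h3
            simp at h3
        have hguard : (((i : Int) < 0 : Bool) || decide ((cs.length : Int) ≤ (i : Int))) = false := by
          have hA : ¬ ((cs.length : Int) ≤ (i : Int)) := by exact_mod_cast Nat.not_le.2 hlt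
          have hB : ¬ ((i : Int) < 0) := by omega
          simp [hA, hB]
        have hL : pvRunLen (cs.drop i) = 4 := by
          have h := congrArg List.length h3
          have hle : pvRunLen (cs.drop i) ≤ (cs.drop i).length := pvRunLen_le_length (cs.drop i)
          rw [List.length_take, Nat.min_eq_left hle, pvNL] at h
          simpa using h
        rw [pvSkipCase cs i "true".toList "True" _ pvNe_true pvW_true h1,
          pvSkipCase cs i "false".toList "False" _ pvNe_false pvW_false h2,
          pvMatchCase cs i "null".toList "None" _ pvNe_null pvW_null h3]
        simp only [replace_json_literal_token_py_alt, ← hcs, hguard, Bool.false_eq_true, if_false,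
          Int.toNat_natCast]
        rw [if_neg h1, if_neg h2, if_pos h3]
        split_ifs with hb
        · rfl
        · rw [hL]; rfl
      · rw [pvSkipCase cs i "true".toList "True" _ pvNe_true pvW_true h1,
          pvSkipCase cs i "false".toList "False" _ pvNe_false pvW_false h2,
          pvSkipCase cs i "null".toList "None" _ pvNe_null pvW_null h3]
        by_cases hbig : cs.length ≤ i
        · have hguard : (((i : Int) < 0 : Bool) || decide ((cs.length : Int) ≤ (i : Int))) = true := by
            have hA : ((cs.length : Int) ≤ (i : Int)) := by exact_mod_cast hbig
            simp [hA]
          simp only [replace_json_literal_token_py_alt, ← hcs, hguard, if_true]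
          rfl
        · have hguard : (((i : Int) < 0 : Bool) || decide ((cs.length : Int) ≤ (i : Int))) = false := by
            have hA : ¬ ((cs.length : Int) ≤ (i : Int)) := by exact_mod_cast Nat.not_le.2 (Nat.lt_of_not_le hbig)
            have hB : ¬ ((i : Int) < 0) := by omega
            simp [hA, hB]
          simp only [replace_json_literal_token_py_alt, ← hcs, hguard, Bool.false_eq_true, if_false,
            Int.toNat_natCast]
          rw [if_neg h1, if_neg h2, if_neg h3]
          rfl

-- ===== VERDICT (by name: the statement is the Claim_ definition above) =====
theorem replace_json_literal_token_py_spec : Claim_equal_replace_json_literal_token_py := by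
  intro content index _ hpre
  unfold Spec_replace_json_literal_token_py replace_json_literal_token_py
  have h : index = ((index.toNat : Nat) : Int) := (Int.toNat_of_nonneg hpre).symm
  rw [h]
  exact pvMain content index.toNat
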